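-- pv_equiv track=rewrite | github.com/kimdahee7/CodingTest_Python | 프로그래머스/1/140108. 문자열 나누기/문자열 나누기.py | solution
-- ===== SOURCE A (Python) =====
-- def solution(s):
--     answer = 0
--     start = s[0]
--     c = 0
--     nc = 0
--     for i in range(len(s)):
--         if s[i] == start:
--             c +=1
--             if c == nc:
--                 answer +=1
--                 c = 0
--                 nc = 0
--                 if i >= len(s)-1:
--                     break
--                 else:
--                     start = s[i+1]
--         else:
--             nc +=1
--             if c == nc:
--                 answer +=1
--                 c = 0
--                 nc = 0
--                 if i >= len(s)-1: #10
--                     break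
--                 else:
--                     start = s[i+1]
--     if c != 0 or nc != 0:
--         answer +=1
--     return answer
-- ===== SOURCE B (Python) =====
-- def solution(s):
--     n = len(s)
--     # For anchor char a let f_a(j) = 2*(# of a in s[:j]) - j.  The segment that
--     # starts at i with anchor a = s[i] ends at the smallest j > i with
--     # f_a(j) == f_a(i) (balance returns to zero), or runs to the end of s.
--     # Precompute, per distinct char a, a jump table nxt with
--     # nxt[j] = smallest j' > j with f_a(j') == f_a(j) (sentinel n+1 if none),
--     # then count segments by O(1) jumps.
--     jump = {}
--     for a in set(s):
--         fs = [0] * (n + 1)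
--         for j in range(n):
--             fs[j + 1] = fs[j] + (1 if s[j] == a else -1)
--         nxt = [n + 1] * (n + 1)
--         last = {}
--         for j in range(n, -1, -1):
--             v = fs[j]
--             if v in last:
--                 nxt[j] = last[v]
--             last[v] = j
--         jump[a] = nxt
--     answer = 0
--     i = 0
--     while i < n:
--         j = jump[s[i]][i]
--         i = j if j <= n else n
--         answer += 1
--     return answer
-- ===== Notes on version B (the rewrite author's own statement) =====
-- stated objective: alternative
-- what changed: B replaces A's greedy per-character match/mismatch counting scan by a precomputed data structure: for each distinct character a it builds the prefix-balance sequence f_a(j) = 2*count_a(s[:j]) - j and a jump table nxt[j] = first j' > j with f_a(j') = f_a(j) (via a backward pass with a value->index dict), then counts segments by O(1) jumps instead of walking them.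
import Mathlib
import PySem

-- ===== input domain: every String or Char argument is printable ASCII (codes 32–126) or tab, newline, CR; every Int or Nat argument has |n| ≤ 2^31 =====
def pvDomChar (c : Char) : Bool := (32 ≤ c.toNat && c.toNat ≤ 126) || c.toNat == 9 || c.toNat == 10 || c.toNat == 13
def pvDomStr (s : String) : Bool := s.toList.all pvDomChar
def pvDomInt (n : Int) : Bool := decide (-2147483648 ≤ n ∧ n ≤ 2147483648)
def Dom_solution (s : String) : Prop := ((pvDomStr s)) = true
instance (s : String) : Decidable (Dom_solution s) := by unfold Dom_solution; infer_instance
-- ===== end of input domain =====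

-- B replaces A's greedy per-character counting scan by precomputed per-character
-- prefix-balance "first return" jump tables, counting segments by table lookups
-- (objective: alternative; same return value, A's IndexError on "" excluded by Pre_).

-- ===== PORT A =====
-- A's for-loop over range(len(s)); state (start, c, nc, answer); returns
-- (answer, c, nc) so the post-loop `if c != 0 or nc != 0` is applied outside.
def solLoopA (l : List Char) (i : Nat) (start : Char) (c nc answer : Int) : Int × Int × Int :=
  if h : i < l.length then
    if l.getD i default == start then
      if c + 1 == nc then
        if l.length - 1 ≤ i then (answer + 1, 0, 0)
        else solLoopA l (i + 1) (l.getD (i + 1) default) 0 0 (answer + 1)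
      else solLoopA l (i + 1) start (c + 1) nc answer
    else
      if c == nc + 1 then
        if l.length - 1 ≤ i then (answer + 1, 0, 0)
        else solLoopA l (i + 1) (l.getD (i + 1) default) 0 0 (answer + 1)
      else solLoopA l (i + 1) start c (nc + 1) answer
  else (answer, c, nc)
termination_by l.length - i
decreasing_by all_goals exact Nat.sub_succ_lt_self _ _ h

def solution (s : String) : Int :=
  match PySem.Str.pyGet? s 0 with
  | none => 0   -- `s[0]` raises IndexError on the empty string: excluded by Pre_solution
  | some start =>
    let r := solLoopA s.toList 0 start 0 0 0
    if r.2.1 != 0 || r.2.2 != 0 then r.1 + 1 else r.1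

-- ===== PORT B =====
-- fs[j] = f_a(j) = 2*(# of a in s[:j]) - j, built by the first inner for-loop
def fsFrom (t : List Char) (a : Char) (f : Int) : List Int :=
  match t with
  | [] => [f]
  | c :: r => f :: fsFrom r a (f + (if c == a then 1 else -1))

-- the backward `for j in range(n, -1, -1)` loop: positions > j are processed
-- first (the recursive call), then nxt[j] is read from `last` and last[v] = j
def nxtGo (fs : List Int) (j n : Nat) : PySem.Dict Int Nat × List Nat :=
  match fs with
  | [] => (PySem.Dict.empty, [])
  | v :: t =>
    let p := nxtGo t (j + 1) n
    (p.1.insert v j, p.1.getD v (n + 1) :: p.2)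

def nxtB (l : List Char) (a : Char) : List Nat := (nxtGo (fsFrom l a 0) 0 l.length).2

-- `for a in set(s): jump[a] = nxt`
def jumpB (l : List Char) : PySem.Dict Char (List Nat) :=
  (PySem.Set.ofList l).foldl (fun d a => d.insert a (nxtB l a)) PySem.Dict.empty

-- the `while i < n` loop; fuel n+1 suffices since i strictly increases
def outerJ (jump : PySem.Dict Char (List Nat)) (l : List Char) : Nat → Nat → Int → Int
  | 0, _, ans => ans
  | fuel + 1, i, ans =>
    if i < l.length then
      let j := (jump.getD (l.getD i default) []).getD i 0
      outerJ jump l fuel (if j ≤ l.length then j else l.length) (ans + 1)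
    else ans

def solution_alt (s : String) : Int :=
  outerJ (jumpB s.toList) s.toList (s.toList.length + 1) 0 0

-- ===== PRECONDITION & SPEC =====
-- Pre_ excludes only the empty string, on which A raises IndexError at `s[0]`.
def Pre_solution (s : String) : Prop := s ≠ ""
instance (s : String) : Decidable (Pre_solution s) := by unfold Pre_solution; infer_instance
def pvWitness_solution : String := "banana"

def Spec_solution (s : String) (out : Int) : Prop := out = solution_alt s
instance (s : String) (out : Int) : Decidable (Spec_solution s out) := by unfold Spec_solution; infer_instance

-- ===== CLAIM (what is proved, stated in full; the proofs are below) =====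
def Claim_equal_solution : Prop := ∀ (s : String), Dom_solution s → Pre_solution s → Spec_solution s (solution s)

-- ===== LEMMAS AND PROOFS =====

-- A's post-loop `if c != 0 or nc != 0: answer += 1`
def finishA (r : Int × Int × Int) : Int := if r.2.1 != 0 || r.2.2 != 0 then r.1 + 1 else r.1

-- proof-side reference loop: walk one segment from j with anchor a and balance
def segLoopB (l : List Char) (anchor : Char) (j : Nat) (bal : Int) : Nat :=
  if h : j < l.length then
    let bal' := bal + (if l.getD j default == anchor then 1 else -1)
    if bal' == 0 then j + 1 else segLoopB l anchor (j + 1) bal'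
  else j
termination_by l.length - j
decreasing_by exact Nat.sub_succ_lt_self _ _ h

theorem segLoopB_gt_aux (l : List Char) : ∀ (k j : Nat) (anchor : Char) (bal : Int),
    l.length - j ≤ k → j < l.length → j < segLoopB l anchor j bal := by
  intro k
  induction k with
  | zero => intro j _ _ hk hj; omega
  | succ k ih =>
    intro j anchor bal _ hj
    rw [segLoopB]
    simp only [dif_pos hj]
    have step : ∀ b' : Int, j < (if b' == 0 then j + 1 else segLoopB l anchor (j + 1) b') := by
      intro b'
      split
      · omega
      · by_cases h2 : j + 1 < l.length
        · exact Nat.lt_trans (Nat.lt_succ_self j) (ih (j + 1) anchor b' (by omega) h2)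
        · rw [segLoopB]
          simp only [dif_neg h2]
          omega
    exact step _

theorem segLoopB_gt (l : List Char) (j : Nat) (anchor : Char) (bal : Int)
    (hj : j < l.length) : j < segLoopB l anchor j bal :=
  segLoopB_gt_aux l (l.length - j) j anchor bal le_rfl hj

-- proof-side reference outer loop: one iteration per segment
def outerB (l : List Char) (i : Nat) (answer : Int) : Int :=
  if h : i < l.length then
    outerB l (segLoopB l (l.getD i default) i 0) (answer + 1)
  else answer
termination_by l.length - i
decreasing_by exact Nat.sub_lt_sub_left h (segLoopB_gt l i (l.getD i default) 0 h)

-- terminal case: the loop index has run off the end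
theorem bridge_stop (l : List Char) (i : Nat) (start : Char) (c nc answer : Int)
    (hi : ¬ i < l.length) (hinv : c = nc → c = 0 ∧ nc = 0) :
    finishA (solLoopA l i start c nc answer) =
      (if c = nc then outerB l i answer
       else outerB l (segLoopB l start i (c - nc)) (answer + 1)) := by
  rw [solLoopA]
  simp only [dif_neg hi]
  by_cases hcn : c = nc
  · obtain ⟨h1, h2⟩ := hinv hcn
    rw [if_pos hcn, outerB]
    simp [finishA, h1, h2, dif_neg hi]
  · rw [if_neg hcn, segLoopB]
    simp only [dif_neg hi]
    rw [outerB]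
    simp only [dif_neg hi]
    simp only [finishA]
    split_ifs with h
    · rfl
    · simp only [Bool.or_eq_true, bne_iff_ne, ne_eq, not_or, not_not] at h
      exact absurd (h.1.trans h.2.symm) hcn

-- Main invariant: A's remaining loop (+ trailing fixup) computes what the
-- remaining segment walk computes.  Entry state: c = nc (= 0) and start is the
-- current char; mid-segment state: c ≠ nc and the segment's balance is c - nc.
theorem bridge (l : List Char) : ∀ k i start c nc answer,
    l.length - i ≤ k → 0 ≤ c → 0 ≤ nc → (c = nc → c = 0 ∧ nc = 0) →
    (c = nc → i < l.length → start = l.getD i default) →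
    finishA (solLoopA l i start c nc answer) =
      (if c = nc then outerB l i answer
       else outerB l (segLoopB l start i (c - nc)) (answer + 1)) := by
  intro k
  induction k with
  | zero =>
    intro i start c nc answer hk _ _ hinv _
    exact bridge_stop l i start c nc answer (by omega) hinv
  | succ k ih =>
    intro i start c nc answer hk hc hnc hinv hstart
    by_cases hi : i < l.length
    · by_cases hcn : c = nc
      · -- entry state: c = nc = 0 and start is the current char
        obtain ⟨h1, h2⟩ := hinv hcn
        subst h1; subst h2
        have hs := hstart rfl hi
        subst hs
        rw [if_pos rfl, outerB]
        simp only [dif_pos hi]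
        rw [solLoopA]
        simp only [dif_pos hi, beq_self_eq_true]
        norm_num
        simp only [← List.getD_eq_getElem?_getD]
        rw [ih (i + 1) (l.getD i default) 1 0 answer (by omega) (by omega) le_rfl
              (by omega) (by intro h; omega)]
        rw [if_neg (by omega : ¬ (1 : Int) = 0)]
        have hseg : segLoopB l (l.getD i default) i 0 = segLoopB l (l.getD i default) (i + 1) 1 := by
          rw [segLoopB]
          simp only [dif_pos hi, beq_self_eq_true]
          norm_num
        rw [hseg]
        norm_num
      · -- mid-segment state: balance c - nc ≠ 0
        rw [if_neg hcn, segLoopB, solLoopA]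
        simp only [dif_pos hi, beq_iff_eq]
        by_cases hch : l.getD i default = start
        · -- current char matches the anchor
          rw [if_pos hch, if_pos hch]
          by_cases h1 : c + 1 = nc
          · rw [if_pos h1, if_pos (by omega : c - nc + 1 = 0)]
            by_cases hend : l.length - 1 ≤ i
            · rw [if_pos hend, outerB]
              simp only [dif_neg (by omega : ¬ i + 1 < l.length), finishA]
              simp
            · rw [if_neg hend]
              rw [ih (i + 1) (l.getD (i + 1) default) 0 0 (answer + 1) (by omega)
                    le_rfl le_rfl (fun _ => ⟨rfl, rfl⟩) (fun _ _ => rfl)]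
              rw [if_pos rfl]
          · rw [if_neg h1, if_neg (by omega : ¬ c - nc + 1 = 0)]
            rw [ih (i + 1) start (c + 1) nc answer (by omega) (by omega) hnc
                  (fun h => absurd h h1) (fun h => absurd h h1)]
            rw [if_neg (by omega : ¬ (c + 1 : Int) = nc)]
            have harith : (c + 1 - nc : Int) = c - nc + 1 := by ring
            rw [harith]
        · -- current char differs from the anchor
          rw [if_neg hch, if_neg hch]
          by_cases h1 : c = nc + 1
          · rw [if_pos h1, if_pos (by omega : c - nc + -1 = 0)]
            by_cases hend : l.length - 1 ≤ i
            · rw [if_pos hend, outerB]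
              simp only [dif_neg (by omega : ¬ i + 1 < l.length), finishA]
              simp
            · rw [if_neg hend]
              rw [ih (i + 1) (l.getD (i + 1) default) 0 0 (answer + 1) (by omega)
                    le_rfl le_rfl (fun _ => ⟨rfl, rfl⟩) (fun _ _ => rfl)]
              rw [if_pos rfl]
          · rw [if_neg h1, if_neg (by omega : ¬ c - nc + -1 = 0)]
            rw [ih (i + 1) start c (nc + 1) answer (by omega) hc (by omega)
                  (fun h => absurd h (by omega)) (fun h => absurd h (by omega))]
            rw [if_neg (by omega : ¬ (c : Int) = nc + 1)]
            have harith : (c - (nc + 1) : Int) = c - nc + -1 := by ring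
            rw [harith]
    · exact bridge_stop l i start c nc answer hi hinv

-- ===== new-side lemmas: the jump table computes the segment walk =====

-- first index ≥ j (over the list fs of values) whose value is v; d if none
def firstIdx (fs : List Int) (j : Nat) (v : Int) (d : Nat) : Nat :=
  match fs with
  | [] => d
  | w :: t => if w = v then j else firstIdx t (j + 1) v d

theorem fsFrom_length (t : List Char) (a : Char) (f : Int) :
    (fsFrom t a f).length = t.length + 1 := by
  induction t generalizing f with
  | nil => rfl
  | cons c r ih => simp [fsFrom, ih]

theorem fsFrom_getD_zero (t : List Char) (a : Char) (f : Int) :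
    (fsFrom t a f).getD 0 0 = f := by
  cases t <;> rfl

theorem fsFrom_succ (t : List Char) (a : Char) : ∀ (f : Int) (j : Nat), j < t.length →
    (fsFrom t a f).getD (j + 1) 0 =
      (fsFrom t a f).getD j 0 + (if t.getD j default == a then 1 else -1) := by
  induction t with
  | nil => intro f j hj; simp at hj
  | cons c r ih =>
    intro f j hj
    cases j with
    | zero =>
      simp only [fsFrom, List.getD_cons_succ, List.getD_cons_zero, fsFrom_getD_zero]
    | succ j =>
      simp only [fsFrom, List.getD_cons_succ]
      exact ih _ j (by simpa using hj)

theorem nxtGo_fst_getD (n : Nat) : ∀ (fs : List Int) (j : Nat) (v : Int),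
    (nxtGo fs j n).1.getD v (n + 1) = firstIdx fs j v (n + 1) := by
  intro fs
  induction fs with
  | nil => intro j v; simp [nxtGo, firstIdx, PySem.Dict.getD_empty]
  | cons w t ih =>
    intro j v
    simp only [nxtGo, firstIdx, PySem.Dict.getD_insert]
    by_cases h : v = w
    · subst h; simp
    · rw [if_neg h, if_neg (fun hw => h hw.symm), ih]

theorem nxtGo_snd_getD (n : Nat) : ∀ (fs : List Int) (j r : Nat), r < fs.length →
    (nxtGo fs j n).2.getD r 0 =
      firstIdx (fs.drop (r + 1)) (j + r + 1) (fs.getD r 0) (n + 1) := by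
  intro fs
  induction fs with
  | nil => intro j r hr; simp at hr
  | cons w t ih =>
    intro j r hr
    cases r with
    | zero =>
      simp only [nxtGo, List.getD_cons_zero, List.drop_succ_cons, List.drop_zero]
      rw [nxtGo_fst_getD]
    | succ r =>
      simp only [nxtGo, List.getD_cons_succ, List.drop_succ_cons]
      rw [ih (j + 1) r (by simpa using hr)]
      congr 1
      omega

-- the segment walk from j with balance fs(j) - V finds the first j' > j with
-- fs(j') = V (and stops at the end of the string otherwise)
theorem seg_first (l : List Char) (a : Char) : ∀ (k j : Nat) (V : Int),
    l.length - j ≤ k → j ≤ l.length →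
    segLoopB l a j ((fsFrom l a 0).getD j 0 - V) =
      min (firstIdx ((fsFrom l a 0).drop (j + 1)) (j + 1) V (l.length + 1)) l.length := by
  intro k
  induction k with
  | zero =>
    intro j V hk hj
    have hj' : j = l.length := by omega
    subst hj'
    rw [segLoopB]
    simp only [dif_neg (lt_irrefl l.length)]
    rw [List.drop_eq_nil_of_le (by rw [fsFrom_length])]
    simp [firstIdx]
  | succ k ih =>
    intro j V hk hj
    by_cases hlt : j < l.length
    · rw [segLoopB]
      simp only [dif_pos hlt]
      have hsucc := fsFrom_succ l a 0 j hlt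
      have hdrop : (fsFrom l a 0).drop (j + 1) =
          (fsFrom l a 0).getD (j + 1) 0 :: (fsFrom l a 0).drop (j + 2) := by
        have hlen : j + 1 < (fsFrom l a 0).length := by rw [fsFrom_length]; omega
        rw [List.drop_eq_getElem_cons hlen, List.getD_eq_getElem _ _ hlen]
      rw [hdrop]
      simp only [firstIdx]
      by_cases hz : (fsFrom l a 0).getD (j + 1) 0 = V
      · rw [if_pos hz]
        have : ((fsFrom l a 0).getD j 0 - V + (if l.getD j default == a then 1 else -1)) = 0 := by
          omega
        rw [this]
        simp only [beq_self_eq_true, if_true]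
        omega
      · rw [if_neg hz]
        have hb : ((fsFrom l a 0).getD j 0 - V + (if l.getD j default == a then 1 else -1)) =
            (fsFrom l a 0).getD (j + 1) 0 - V := by omega
        rw [hb]
        have hbne : (((fsFrom l a 0).getD (j + 1) 0 - V) == 0) = false := by
          simp only [beq_eq_false_iff_ne, ne_eq]
          omega
        rw [hbne]
        simp only [Bool.false_eq_true, if_false]
        have := ih (j + 1) V (by omega) (by omega)
        rw [this]
    · rw [segLoopB]
      simp only [dif_neg hlt]
      rw [List.drop_eq_nil_of_le (by rw [fsFrom_length]; omega)]
      simp [firstIdx]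
      omega

-- hence the jump table entry at a segment start is the segment walk
theorem nxtB_getD (l : List Char) (a : Char) (i : Nat) (hi : i < l.length) :
    min ((nxtB l a).getD i 0) l.length = segLoopB l a i 0 := by
  unfold nxtB
  rw [nxtGo_snd_getD l.length (fsFrom l a 0) 0 i (by rw [fsFrom_length]; omega), Nat.zero_add]
  have := seg_first l a (l.length - i) i ((fsFrom l a 0).getD i 0) (by omega) (by omega)
  rw [sub_self] at this
  exact this.symm

-- the jump dict lookup: every char of l is a key, bound to its nxt table
theorem jump_foldl_getD (l : List Char) (a : Char) : ∀ (chars : List Char)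
    (d : PySem.Dict Char (List Nat)),
    (chars.foldl (fun d a => d.insert a (nxtB l a)) d).getD a [] =
      if a ∈ chars then nxtB l a else d.getD a [] := by
  intro chars
  induction chars with
  | nil => intro d; simp
  | cons c cs ih =>
    intro d
    simp only [List.foldl_cons]
    rw [ih]
    by_cases hmem : a ∈ cs
    · simp [hmem]
    · rw [if_neg hmem, PySem.Dict.getD_insert]
      by_cases hac : a = c
      · subst hac; simp
      · simp [hac, hmem]

theorem jumpB_getD (l : List Char) (a : Char) (ha : a ∈ l) :
    (jumpB l).getD a [] = nxtB l a := by
  unfold jumpB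
  rw [jump_foldl_getD]
  rw [if_pos (by rw [PySem.Set.mem_ofList]; exact ha)]

-- the fueled jump loop equals the reference outer loop
theorem outerJ_eq_outerB (l : List Char) : ∀ (fuel i : Nat) (ans : Int),
    l.length - i < fuel → outerJ (jumpB l) l fuel i ans = outerB l i ans := by
  intro fuel
  induction fuel with
  | zero => intro i ans h; omega
  | succ fuel ih =>
    intro i ans h
    rw [outerJ]
    by_cases hi : i < l.length
    · rw [if_pos hi, outerB]
      simp only [dif_pos hi]
      have hmem : l.getD i default ∈ l := by
        rw [List.getD_eq_getElem _ _ hi]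
        exact List.getElem_mem hi
      rw [jumpB_getD l _ hmem]
      have hstep : (if (nxtB l (l.getD i default)).getD i 0 ≤ l.length
            then (nxtB l (l.getD i default)).getD i 0 else l.length) =
          segLoopB l (l.getD i default) i 0 := by
        rw [← nxtB_getD l (l.getD i default) i hi, Nat.min_def]
      rw [hstep]
      exact ih _ _ (by
        have := segLoopB_gt l i (l.getD i default) 0 hi
        omega)
    · rw [if_neg hi, outerB]
      simp only [dif_neg hi]

-- ===== VERDICT (by name: the statement is the Claim_ definition above) =====
theorem solution_spec : Claim_equal_solution := by
  intro s _ hpre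
  unfold Spec_solution solution solution_alt
  have hne : s.toList ≠ [] := by
    intro h
    apply hpre
    have := congrArg String.ofList h
    simpa using this
  have hlen : 0 < s.toList.length := List.length_pos_of_ne_nil hne
  have hget : PySem.Str.pyGet? s 0 = some (s.toList.getD 0 default) := by
    rw [show (0 : Int) = ((0 : Nat) : Int) from rfl, PySem.Str.pyGet?_natCast]
    rw [List.getElem?_eq_getElem hlen, List.getD_eq_getElem?_getD,
        List.getElem?_eq_getElem hlen]
    rfl
  rw [hget]
  have hbr := bridge s.toList s.toList.length 0 (s.toList.getD 0 default) 0 0 0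
    (by omega) le_rfl le_rfl (fun _ => ⟨rfl, rfl⟩) (fun _ _ => rfl)
  rw [if_pos rfl] at hbr
  rw [outerJ_eq_outerB s.toList (s.toList.length + 1) 0 0 (by omega)]
  exact hbr
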